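-- pv_equiv track=rewrite | github.com/Z-702/TractoMFormer | FC-1DCNN/dti/make_500_fold_csv.py | deduplicate_rows
-- ===== SOURCE A (Python) =====
-- from collections import Counter, defaultdict
--
-- def deduplicate_rows(rows, subject_col):
--     dedup = {}
--     duplicates = defaultdict(int)
--     for row in rows:
--         sid = str(row[subject_col]).strip()
--         if sid in dedup:
--             duplicates[sid] += 1
--             continue
--         dedup[sid] = row
--     return dedup, duplicates
-- ===== SOURCE B (Python) =====
-- from collections import defaultdict
--
-- def deduplicate_rows(rows, subject_col):
--     groups = defaultdict(list)
--     for row in rows: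
--         groups[str(row[subject_col]).strip()].append(row)
--     dedup = {sid: grp[0] for sid, grp in groups.items()}
--     duplicates = defaultdict(int)
--     for sid, grp in groups.items():
--         if len(grp) > 1:
--             duplicates[sid] = len(grp) - 1
--     return dedup, duplicates
-- ===== Notes on version B (the rewrite author's own statement) =====
-- stated objective: alternative
-- what changed: Replaces A's single stateful pass maintaining two dicts by a group-then-derive decomposition: one pass groups the rows by normalized subject id, then dedup (first row of each group) and duplicates (group size minus one, for groups of size > 1) are read off the grouping table. Pre_ excludes rows lists lacking the subject_col key in some row (A raises KeyError there) and lists where two distinct duplicated ids have their second occurrences out of first-occurrence order, on which the key insertion order of the duplicates dict (A: second-occurrence order, B: first-occurrence order) is accidental; …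
import Mathlib
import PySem

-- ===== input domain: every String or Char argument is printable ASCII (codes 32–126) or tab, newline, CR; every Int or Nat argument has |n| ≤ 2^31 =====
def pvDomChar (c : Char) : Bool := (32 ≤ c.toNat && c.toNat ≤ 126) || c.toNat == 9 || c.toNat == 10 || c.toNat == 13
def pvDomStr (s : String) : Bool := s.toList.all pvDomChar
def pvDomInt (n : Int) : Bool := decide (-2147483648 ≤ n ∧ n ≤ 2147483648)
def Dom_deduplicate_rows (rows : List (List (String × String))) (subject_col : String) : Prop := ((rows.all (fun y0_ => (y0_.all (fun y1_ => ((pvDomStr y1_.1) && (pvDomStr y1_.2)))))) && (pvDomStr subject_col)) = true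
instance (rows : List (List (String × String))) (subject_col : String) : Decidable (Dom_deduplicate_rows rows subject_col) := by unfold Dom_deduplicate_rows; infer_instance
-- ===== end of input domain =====

-- B replaces A's single stateful two-dict pass by a group-then-derive decomposition (same values, no speed claim).

-- the normalization expression str(row[subject_col]).strip(), shared verbatim by both Pythons;
-- the getD "" default is unreachable inside Pre_ (a missing key raises KeyError in Python and is excluded).
def pvSid (c : String) (row : List (String × String)) : String :=
  PySem.Str.strip ((PySem.Dict.get? ⟨row⟩ c).getD "")

-- ===== PORT A =====
def deduplicate_rows (rows : List (List (String × String))) (subject_col : String) : (List (String × List (String × String))) × (List (String × Int)) :=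
  let st := rows.foldl
    (fun (st : PySem.Dict String (List (String × String)) × PySem.Dict String Int) row =>
      let sid := pvSid subject_col row
      if PySem.Dict.contains st.1 sid then
        (st.1, PySem.Dict.insert st.2 sid (PySem.Dict.getD st.2 sid 0 + 1))
      else
        (PySem.Dict.insert st.1 sid row, st.2))
    (⟨[]⟩, ⟨[]⟩)
  (st.1.items, st.2.items)

-- ===== PORT B =====
-- grp[0] is ported as headD []: every group is nonempty by construction, so no IndexError arises.
def deduplicate_rows_alt (rows : List (List (String × String))) (subject_col : String) : (List (String × List (String × String))) × (List (String × Int)) :=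
  let groups : PySem.Dict String (List (List (String × String))) :=
    rows.foldl (fun g row => PySem.Dict.modify g (pvSid subject_col row) [] (fun grp => grp ++ [row])) ⟨[]⟩
  let dedup : PySem.Dict String (List (String × String)) :=
    groups.items.foldl (fun d p => PySem.Dict.insert d p.1 (p.2.headD [])) ⟨[]⟩
  let duplicates : PySem.Dict String Int :=
    groups.items.foldl
      (fun d p => if 1 < p.2.length then PySem.Dict.insert d p.1 ((p.2.length : Int) - 1) else d) ⟨[]⟩
  (dedup.items, duplicates.items)

-- ===== PRECONDITION & SPEC =====
-- the normalized ids whose running count at their position is exactly 1, i.e. the second occurrences, in order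
def pvSo (l : List String) : List String :=
  ((PySem.List.enumerate l).filter
    (fun p => PySem.List.count (PySem.List.slice l none (some p.1)) p.2 == 1)).map (·.2)

-- Pre_ excludes rows lists where some row lacks the subject_col key (Python A raises KeyError there), and
-- lists where the duplicated ids' second occurrences are out of first-occurrence order, on which the key
-- insertion order of the duplicates dict (A: second-occurrence order, B: first-occurrence order) is accidental.
def Pre_deduplicate_rows (rows : List (List (String × String))) (subject_col : String) : Prop :=
  (∀ row ∈ rows, PySem.Dict.contains (⟨row⟩ : PySem.Dict String String) subject_col = true) ∧
  pvSo (rows.map (pvSid subject_col)) =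
    (PySem.Set.ofList (rows.map (pvSid subject_col))).filter
      (fun s => decide (2 ≤ (rows.map (pvSid subject_col)).count s))
instance (rows : List (List (String × String))) (subject_col : String) : Decidable (Pre_deduplicate_rows rows subject_col) := by unfold Pre_deduplicate_rows; infer_instance
def pvWitness_deduplicate_rows : (List (List (String × String))) × String :=
  ([[("id", " s1 "), ("v", "a")], [("id", "s1"), ("v", "b")], [("id", "s2"), ("v", "c")]], "id")

def Spec_deduplicate_rows (rows : List (List (String × String))) (subject_col : String) (out : (List (String × List (String × String))) × (List (String × Int))) : Prop := out = deduplicate_rows_alt rows subject_col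
instance (rows : List (List (String × String))) (subject_col : String) (out : (List (String × List (String × String))) × (List (String × Int))) : Decidable (Spec_deduplicate_rows rows subject_col out) := by unfold Spec_deduplicate_rows; infer_instance

-- ===== CLAIM (what is proved, stated in full; the proofs are below) =====
def Claim_equal_deduplicate_rows : Prop := ∀ (rows : List (List (String × String))) (subject_col : String), Dom_deduplicate_rows rows subject_col → Pre_deduplicate_rows rows subject_col → Spec_deduplicate_rows rows subject_col (deduplicate_rows rows subject_col)

-- ===== LEMMAS AND PROOFS =====

theorem pv_ofList_snoc {α : Type} [BEq α] [LawfulBEq α] (l : List α) (s : α) :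
    PySem.Set.ofList (l ++ [s]) = if s ∈ l then PySem.Set.ofList l else PySem.Set.ofList l ++ [s] := by
  rw [PySem.Set.ofList_append_singleton, PySem.Set.add_eq_ite]
  by_cases h : s ∈ l
  · simp [h, PySem.Set.mem_ofList]
  · have : s ∉ PySem.Set.ofList l := fun hc => h ((PySem.Set.mem_ofList l s).mp hc)
    simp [h, this]

-- Dict-of-mapped-keys lemmas (values a function of the key)
theorem pv_contains_mk_map {ν : Type} (l : List String) (g : String → ν) (k : String) :
    PySem.Dict.contains (⟨l.map (fun s => (s, g s))⟩ : PySem.Dict String ν) k = decide (k ∈ l) := by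
  unfold PySem.Dict.contains
  induction l with
  | nil => simp
  | cons x t ih =>
      simp only [List.map_cons, List.any_cons, ih, List.mem_cons]
      by_cases hx : x = k
      · subst hx; simp
      · simp [hx, Ne.symm hx]

theorem pv_find?_self (l : List String) (k : String) :
    l.find? (fun s => s == k) = if k ∈ l then some k else none := by
  induction l with
  | nil => simp
  | cons x t ih =>
      by_cases hx : x = k
      · subst hx; simp
      · have hbe : (x == k) = false := by simp [hx]
        simp [hbe, ih, Ne.symm hx]

theorem pv_get?_mk_map {ν : Type} (l : List String) (g : String → ν) (k : String) :
    PySem.Dict.get? (⟨l.map (fun s => (s, g s))⟩ : PySem.Dict String ν) k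
      = if k ∈ l then some (g k) else none := by
  unfold PySem.Dict.get?
  rw [List.find?_map]
  have hp : ((fun (p : String × ν) => p.1 == k) ∘ fun s => (s, g s)) = (fun s => s == k) := rfl
  rw [hp, pv_find?_self]
  by_cases h : k ∈ l <;> simp [h]

theorem pv_insert_mk_map_mem {ν : Type} (l : List String) (g : String → ν) (k : String) (v : ν)
    (h : k ∈ l) :
    PySem.Dict.insert (⟨l.map (fun s => (s, g s))⟩ : PySem.Dict String ν) k v
      = ⟨l.map (fun s => (s, if s = k then v else g s))⟩ := by
  unfold PySem.Dict.insert
  rw [pv_contains_mk_map]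
  simp only [h, decide_true, if_true]
  congr 1
  simp only [List.map_map]
  apply List.map_congr_left
  intro s _
  by_cases hs : s = k
  · subst hs; simp
  · simp [hs]

theorem pv_insert_mk_map_not_mem {ν : Type} (l : List String) (g : String → ν) (k : String) (v : ν)
    (h : k ∉ l) :
    PySem.Dict.insert (⟨l.map (fun s => (s, g s))⟩ : PySem.Dict String ν) k v
      = ⟨l.map (fun s => (s, g s)) ++ [(k, v)]⟩ := by
  unfold PySem.Dict.insert
  rw [pv_contains_mk_map]
  simp [h]

theorem pv_getD_mk_map {ν : Type} (l : List String) (g : String → ν) (k : String) (dflt : ν) :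
    PySem.Dict.getD (⟨l.map (fun s => (s, g s))⟩ : PySem.Dict String ν) k dflt
      = if k ∈ l then g k else dflt := by
  unfold PySem.Dict.getD
  rw [pv_get?_mk_map]
  by_cases h : k ∈ l <;> simp [h]

-- pvSo characterizations
theorem pvSo_snoc (l : List String) (s : String) :
    pvSo (l ++ [s]) = pvSo l ++ (if List.count s l = 1 then [s] else []) := by
  unfold pvSo
  rw [PySem.List.enumerate_append]
  rw [List.filter_append, List.map_append]
  congr 1
  · congr 1
    apply List.filter_congr
    intro p hp
    rcases (PySem.List.mem_enumerate_iff l 0 p).mp hp with ⟨k, hk, rfl⟩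
    simp only [zero_add]
    rw [PySem.List.slice_to_natCast, PySem.List.slice_to_natCast,
        List.take_append_of_le_length (le_of_lt hk)]
  · simp only [PySem.List.enumerate, List.filter_cons, List.filter_nil]
    rw [show ((0 : Int) + l.length) = ((l.length : Nat) : Int) by ring]
    rw [PySem.List.slice_to_natCast, List.take_append_of_le_length (le_refl _), List.take_length,
        PySem.List.count_eq]
    by_cases h : List.count s l = 1 <;> simp [h]

theorem pv_mem_pvSo (l : List String) (x : String) : x ∈ pvSo l ↔ 2 ≤ List.count x l := by
  induction l using List.reverseRecOn with
  | nil => simp [pvSo, PySem.List.enumerate]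
  | append_singleton t s ih =>
      rw [pvSo_snoc, List.mem_append, ih, List.count_append]
      by_cases hxs : x = s
      · subst hxs
        have hs1 : List.count x [x] = 1 := by simp
        rw [hs1]
        by_cases h1 : List.count x t = 1
        · rw [if_pos h1]; simp [h1]
        · rw [if_neg h1]
          simp only [List.not_mem_nil, or_false]
          omega
      · have hc : List.count x [s] = 0 := by
          rw [List.count_eq_zero]
          simp [hxs]
        rw [hc]
        split
        · simp [hxs]
        · simp

-- first row of rows whose normalized id is s
def pvFirst (c : String) (rows : List (List (String × String))) (s : String) :
    List (String × String) :=
  (rows.filter (fun r => pvSid c r == s)).headD []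

theorem pv_first_stable (c : String) (rs : List (List (String × String)))
    (r : List (String × String)) (t : String) (ht : t ∈ rs.map (pvSid c)) :
    pvFirst c (rs ++ [r]) t = pvFirst c rs t := by
  unfold pvFirst
  rw [List.filter_append]
  rcases List.mem_map.mp ht with ⟨r0, hr0, hsid⟩
  have hne : rs.filter (fun r' => pvSid c r' == t) ≠ [] :=
    List.ne_nil_of_mem (List.mem_filter.mpr ⟨hr0, by simp [hsid]⟩)
  rcases List.exists_cons_of_ne_nil hne with ⟨x, xs, hx⟩
  rw [hx]
  simp

theorem pv_first_new (c : String) (rs : List (List (String × String)))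
    (r : List (String × String)) (hm : pvSid c r ∉ rs.map (pvSid c)) :
    pvFirst c (rs ++ [r]) (pvSid c r) = r := by
  unfold pvFirst
  rw [List.filter_append]
  have h0 : rs.filter (fun r' => pvSid c r' == pvSid c r) = [] := by
    rw [List.filter_eq_nil_iff]
    intro x hx
    simp only [beq_iff_eq]
    intro h
    exact hm (List.mem_map.mpr ⟨x, hx, h⟩)
  rw [h0]
  simp

theorem pv_len_filter (c : String) (rows : List (List (String × String))) (s : String) :
    (rows.filter (fun r => pvSid c r == s)).length = (rows.map (pvSid c)).count s := by
  induction rows with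
  | nil => simp
  | cons r t ih =>
      simp only [List.filter_cons, List.map_cons, List.count_cons]
      by_cases h : pvSid c r = s
      · simp [h, ih]
      · simp [h, ih]

-- A's loop, characterized
theorem pv_mainA (c : String) (rows : List (List (String × String))) :
    rows.foldl
      (fun (st : PySem.Dict String (List (String × String)) × PySem.Dict String Int) row =>
        let sid := pvSid c row
        if PySem.Dict.contains st.1 sid then
          (st.1, PySem.Dict.insert st.2 sid (PySem.Dict.getD st.2 sid 0 + 1))
        else
          (PySem.Dict.insert st.1 sid row, st.2))
      (⟨[]⟩, ⟨[]⟩)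
    = (⟨(PySem.Set.ofList (rows.map (pvSid c))).map
          (fun s => (s, pvFirst c rows s))⟩,
       ⟨(pvSo (rows.map (pvSid c))).map
          (fun s => (s, (List.count s (rows.map (pvSid c)) : Int) - 1))⟩) := by
  induction rows using List.reverseRecOn with
  | nil => rfl
  | append_singleton rs r ih =>
      rw [List.foldl_append, List.foldl_cons, List.foldl_nil, ih]
      set s := pvSid c r with hsdef
      set sids := rs.map (pvSid c) with hsids
      have hmap : (rs ++ [r]).map (pvSid c) = sids ++ [s] := by simp [hsids, hsdef]
      rw [hmap]
      simp only []
      rw [pv_contains_mk_map]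
      by_cases hmem : s ∈ PySem.Set.ofList sids
      · have hm : s ∈ sids := (PySem.Set.mem_ofList sids s).mp hmem
        rw [if_pos (by simpa using hmem)]
        have hded : PySem.Set.ofList (sids ++ [s]) = PySem.Set.ofList sids := by
          rw [pv_ofList_snoc, if_pos hm]
        have hget : ({ items := (pvSo sids).map (fun u => (u, (List.count u sids : Int) - 1)) } :
            PySem.Dict String Int).getD s 0
            = if s ∈ pvSo sids then (List.count s sids : Int) - 1 else 0 := by
          rw [pv_getD_mk_map]
        rw [Prod.mk.injEq]
        refine ⟨?_, ?_⟩
        · rw [hded]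
          congr 1
          apply List.map_congr_left
          intro u hu
          rw [pv_first_stable c rs r u ((PySem.Set.mem_ofList sids u).mp hu)]
        · by_cases h2 : 2 ≤ List.count s sids
          · have hso : s ∈ pvSo sids := (pv_mem_pvSo _ _).mpr h2
            rw [hget, if_pos hso, pv_insert_mk_map_mem _ _ _ _ hso]
            have hso' : pvSo (sids ++ [s]) = pvSo sids := by
              rw [pvSo_snoc, if_neg (by omega)]
              simp
            rw [hso']
            congr 1
            apply List.map_congr_left
            intro u hu
            by_cases hus : u = s
            · rw [if_pos hus, hus]
              congr 1
              have hc1 : List.count s [s] = 1 := by simp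
              rw [List.count_append, hc1]
              push_cast
              ring
            · rw [if_neg hus]
              congr 1
              have hc0 : List.count u [s] = 0 := by
                rw [List.count_eq_zero]
                simp [hus]
              rw [List.count_append, hc0]
              simp
          · have hm1 : 1 ≤ List.count s sids := List.one_le_count_iff.mpr hm
            have h1 : List.count s sids = 1 := by omega
            have hso : s ∉ pvSo sids := fun hc => by
              have := (pv_mem_pvSo _ _).mp hc
              omega
            rw [hget, if_neg hso, pv_insert_mk_map_not_mem _ _ _ _ hso]
            have hso' : pvSo (sids ++ [s]) = pvSo sids ++ [s] := by
              rw [pvSo_snoc, if_pos h1]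
            rw [hso', List.map_append]
            congr 1
            congr 1
            · apply List.map_congr_left
              intro u hu
              have hu2 : 2 ≤ List.count u sids := (pv_mem_pvSo _ _).mp hu
              have hus : u ≠ s := fun h => by
                subst h
                omega
              congr 1
              have hc0 : List.count u [s] = 0 := by
                rw [List.count_eq_zero]
                simp [hus]
              rw [List.count_append, hc0]
              simp
            · have hc1 : List.count s [s] = 1 := by simp
              simp only [List.map_cons, List.map_nil]
              rw [List.count_append, hc1, h1]
              norm_num
      · rw [if_neg (by simpa using hmem)]
        have hm : s ∉ sids := fun h => hmem ((PySem.Set.mem_ofList sids s).mpr h)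
        have hded : PySem.Set.ofList (sids ++ [s]) = PySem.Set.ofList sids ++ [s] := by
          rw [pv_ofList_snoc, if_neg hm]
        rw [Prod.mk.injEq]
        refine ⟨?_, ?_⟩
        · rw [pv_insert_mk_map_not_mem _ _ _ _ hmem, hded, List.map_append]
          congr 2
          · apply List.map_congr_left
            intro u hu
            rw [pv_first_stable c rs r u ((PySem.Set.mem_ofList sids u).mp hu)]
          · simp only [List.map_cons, List.map_nil]
            rw [pv_first_new c rs r hm]
        · have hso' : pvSo (sids ++ [s]) = pvSo sids := by
            rw [pvSo_snoc, if_neg (by rw [List.count_eq_zero.mpr hm]; omega)]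
            simp
          rw [hso']
          congr 1
          apply List.map_congr_left
          intro u hu
          have hu2 : 2 ≤ List.count u sids := (pv_mem_pvSo _ _).mp hu
          have hus : u ≠ s := fun h => by
            subst h
            exact hm ((List.one_le_count_iff).mp (by omega))
          congr 1
          have hc0 : List.count u [s] = 0 := by
            rw [List.count_eq_zero]
            simp [hus]
          rw [List.count_append, hc0]
          simp

-- B's grouping loop, characterized
theorem pv_groups (c : String) (rows : List (List (String × String))) :
    rows.foldl (fun g row => PySem.Dict.modify g (pvSid c row) [] (fun grp => grp ++ [row])) ⟨[]⟩
      = ⟨(PySem.Set.ofList (rows.map (pvSid c))).map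
          (fun s => (s, rows.filter (fun r => pvSid c r == s)))⟩ := by
  induction rows using List.reverseRecOn with
  | nil => rfl
  | append_singleton rs r ih =>
      rw [List.foldl_append, List.foldl_cons, List.foldl_nil, ih]
      set s := pvSid c r with hsdef
      set sids := rs.map (pvSid c) with hsids
      have hmap : (rs ++ [r]).map (pvSid c) = sids ++ [s] := by simp [hsids, hsdef]
      rw [hmap]
      unfold PySem.Dict.modify
      rw [pv_getD_mk_map]
      by_cases hm : s ∈ sids
      · have hmem : s ∈ PySem.Set.ofList sids := (PySem.Set.mem_ofList sids s).mpr hm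
        rw [if_pos hmem, pv_insert_mk_map_mem _ _ _ _ hmem]
        rw [pv_ofList_snoc, if_pos hm]
        congr 1
        apply List.map_congr_left
        intro u hu
        rw [List.filter_append]
        by_cases hus : u = s
        · subst hus
          simp [hsdef]
        · rw [if_neg hus]
          have h0 : [r].filter (fun r' => pvSid c r' == u) = [] := by
            simp only [List.filter_cons, List.filter_nil, ← hsdef]
            simp [Ne.symm hus]
          rw [h0, List.append_nil]
      · have hmem : s ∉ PySem.Set.ofList sids := fun hc => hm ((PySem.Set.mem_ofList sids s).mp hc)
        rw [if_neg hmem, pv_insert_mk_map_not_mem _ _ _ _ hmem]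
        rw [pv_ofList_snoc, if_neg hm, List.map_append]
        congr 1
        congr 1
        · apply List.map_congr_left
          intro u hu
          rw [List.filter_append]
          have hus : u ≠ s := fun h => hm (h ▸ (PySem.Set.mem_ofList sids u).mp hu)
          have h0 : [r].filter (fun r' => pvSid c r' == u) = [] := by
            simp only [List.filter_cons, List.filter_nil, ← hsdef]
            simp [Ne.symm hus]
          rw [h0, List.append_nil]
        · simp only [List.map_cons, List.map_nil]
          have h0 : rs.filter (fun r' => pvSid c r' == s) = [] := by
            rw [List.filter_eq_nil_iff]
            intro x hx
            simp only [beq_iff_eq]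
            intro h
            exact hm (hsids ▸ List.mem_map.mpr ⟨x, hx, h⟩)
          rw [List.filter_append, h0]
          simp [hsdef]

-- fold of insert with a value that is a function of the key = dict over first occurrences
theorem pv_buildD {ν : Type} (g : String → ν) (l : List String) :
    l.foldl (fun d s => PySem.Dict.insert d s (g s)) (⟨[]⟩ : PySem.Dict String ν)
      = ⟨(PySem.Set.ofList l).map (fun s => (s, g s))⟩ := by
  induction l using List.reverseRecOn with
  | nil => rfl
  | append_singleton t s ih =>
      rw [List.foldl_append, List.foldl_cons, List.foldl_nil, ih, pv_ofList_snoc]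
      by_cases h : s ∈ t
      · rw [if_pos h]
        rw [pv_insert_mk_map_mem _ _ _ _ ((PySem.Set.mem_ofList t s).mpr h)]
        congr 1
        apply List.map_congr_left
        intro u _
        by_cases hu : u = s
        · subst hu; simp
        · simp [hu]
      · rw [if_neg h]
        rw [pv_insert_mk_map_not_mem _ _ _ _ (fun hc => h ((PySem.Set.mem_ofList t s).mp hc))]
        simp

-- B, characterized
theorem pv_mainB (rows : List (List (String × String))) (c : String) :
    deduplicate_rows_alt rows c
      = ((⟨(PySem.Set.ofList (rows.map (pvSid c))).map
            (fun s => (s, pvFirst c rows s))⟩ : PySem.Dict String (List (String × String))).items,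
         (⟨((PySem.Set.ofList (rows.map (pvSid c))).filter
              (fun s => decide (2 ≤ (rows.map (pvSid c)).count s))).map
            (fun s => (s, (List.count s (rows.map (pvSid c)) : Int) - 1))⟩ : PySem.Dict String Int).items) := by
  unfold deduplicate_rows_alt
  simp only []
  rw [pv_groups]
  set sidSet := PySem.Set.ofList (rows.map (pvSid c)) with hss
  have hitems : ({ items := sidSet.map (fun s => (s, rows.filter (fun r => pvSid c r == s))) } :
      PySem.Dict String (List (List (String × String)))).items
      = sidSet.map (fun s => (s, rows.filter (fun r => pvSid c r == s))) := rfl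
  rw [hitems, Prod.mk.injEq]
  constructor
  · rw [List.foldl_map]
    have : (fun (d : PySem.Dict String (List (String × String))) s =>
        PySem.Dict.insert d s ((rows.filter (fun r => pvSid c r == s)).headD []))
        = fun d s => PySem.Dict.insert d s (pvFirst c rows s) := rfl
    rw [this, pv_buildD, PySem.Set.ofList_eq_self_of_nodup _ (PySem.Set.nodup_ofList _)]
  · rw [List.foldl_map]
    rw [PySem.List.foldl_ite_eq_foldl_filter
      (p := fun s => 1 < (rows.filter (fun r => pvSid c r == s)).length)
      (f := fun (d : PySem.Dict String Int) s =>
        PySem.Dict.insert d s (((rows.filter (fun r => pvSid c r == s)).length : Int) - 1))]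
    have hfc : sidSet.filter (fun s => decide (1 < (rows.filter (fun r => pvSid c r == s)).length))
        = sidSet.filter (fun s => decide (2 ≤ (rows.map (pvSid c)).count s)) := by
      apply List.filter_congr
      intro u _
      rw [pv_len_filter]
      simp only [decide_eq_decide]
      omega
    rw [hfc, pv_buildD,
        PySem.Set.ofList_eq_self_of_nodup _ ((PySem.Set.nodup_ofList _).filter _)]
    congr 1
    congr 1
    apply List.map_congr_left
    intro u _
    rw [pv_len_filter]

-- ===== VERDICT (by name: the statement is the Claim_ definition above) =====
theorem deduplicate_rows_spec : Claim_equal_deduplicate_rows := by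
  intro rows c _ hpre
  unfold Spec_deduplicate_rows
  rw [pv_mainB]
  unfold deduplicate_rows
  rw [pv_mainA]
  rw [hpre.2]
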